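-- pv_equiv track=rewrite | github.com/HorseRacingFather/HorseRacingFather | web/scripts/predict.py | ensure_permutation_ranks
-- ===== SOURCE A (Python) =====
-- from typing import Dict, List, Any, Optional
--
-- def ensure_permutation_ranks(horse_ids: List[str], raw: Dict[str, Any]) -> Dict[str, int]:
--     """horseId→rank(1..N) の厳密な順列を生成。壊れていても補正する。
--
--     補正ルール:
--       - 非整数/<=0/欠損は未割当扱い
--       - 重複順位は先勝ち、以降は未割当に回す
--       - 最終的に未割当へ小さい順の空き順位を割当
--     """
--     n = len(horse_ids)
--     assigned: Dict[str, Optional[int]] = {hid: None for hid in horse_ids}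
--     used: set[int] = set()
--
--     for hid in horse_ids:
--         v = raw.get(hid)
--         try:
--             rank = int(v)
--         except Exception:
--             rank = None  # 未割当
--         if rank is not None and 1 <= rank <= n and rank not in used:
--             assigned[hid] = rank
--             used.add(rank)
--
--     # 空き順位のリスト
--     available = [r for r in range(1, n + 1) if r not in used]
--
--     # 未割当を埋める（馬番順の安定割当）
--     for hid in horse_ids:
--         if assigned[hid] is None:
--             assigned[hid] = available.pop(0)
--
--     return {hid: int(assigned[hid]) for hid in horse_ids}
-- ===== SOURCE B (Python) =====
-- def ensure_permutation_ranks(horse_ids, raw):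
--     """Rank-indexed re-implementation: build the inverse permutation slot[r] -> horse
--     first, sweep the ranks 1..n filling the empty slots from the leftover horses,
--     then read each horse's rank back off the inverse array."""
--     n = len(horse_ids)
--     slot = [None] * (n + 1)          # slot[r] = horse that holds rank r
--     placed = set()
--     for hid in horse_ids:
--         if hid in placed:
--             continue
--         try:
--             r = int(raw.get(hid))
--         except Exception:
--             continue
--         if 1 <= r <= n and slot[r] is None:
--             slot[r] = hid
--             placed.add(hid)
--     leftovers = iter([h for h in dict.fromkeys(horse_ids) if h not in placed])
--     for r in range(1, n + 1):
--         if slot[r] is None: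
--             slot[r] = next(leftovers, None)   # stays None once every horse is placed (duplicate ids)
--     rank_of = {}
--     for r in range(1, n + 1):
--         if slot[r] is not None:
--             rank_of[slot[r]] = r
--     return {hid: rank_of[hid] for hid in horse_ids}
-- ===== Notes on version B (the rewrite author's own statement) =====
-- stated objective: faster
-- what changed: B inverts the data layout: instead of A's horse-keyed Optional dict plus a used-rank set and a quadratic available.pop(0) fill loop, it builds the inverse permutation as a rank-indexed slot array (slot[r] = horse), sweeps the ranks 1..n filling empty slots from an iterator of leftover horses, and reads each horse's rank back off the inverse array.
import Mathlib
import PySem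

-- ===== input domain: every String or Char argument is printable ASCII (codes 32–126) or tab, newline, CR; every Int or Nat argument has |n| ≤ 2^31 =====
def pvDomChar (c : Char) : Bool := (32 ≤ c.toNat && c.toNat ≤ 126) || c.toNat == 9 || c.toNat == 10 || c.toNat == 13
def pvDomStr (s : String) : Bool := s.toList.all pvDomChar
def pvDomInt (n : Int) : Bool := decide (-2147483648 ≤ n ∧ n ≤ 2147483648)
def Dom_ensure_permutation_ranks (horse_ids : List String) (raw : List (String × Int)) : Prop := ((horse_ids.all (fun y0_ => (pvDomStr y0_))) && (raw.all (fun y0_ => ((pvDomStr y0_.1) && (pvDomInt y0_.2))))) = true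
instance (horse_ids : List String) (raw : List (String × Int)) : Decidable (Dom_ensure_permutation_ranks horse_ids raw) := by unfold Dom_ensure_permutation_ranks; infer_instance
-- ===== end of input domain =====

-- B inverts the data layout: a rank-indexed slot array (the inverse permutation,
-- slot[r] = horse) filled by a sweep over the ranks 1..n, instead of A's
-- horse-keyed Optional dict + used-rank set + available.pop(0) loop (objective: faster, measured).

-- ===== PORT A =====
-- raw.get(hid): first-match lookup in the association list (the type convention for dict)
def pvAStep1 (raw : List (String × Int)) (n : Int)
    (s : PySem.Dict String (Option Int) × PySem.Set Int) (hid : String) :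
    PySem.Dict String (Option Int) × PySem.Set Int :=
  match (PySem.Dict.mk raw).get? hid with
  | some rank =>          -- int(v) on an int value is the value; v = None raises → rank = None
      if 1 ≤ rank ∧ rank ≤ n ∧ ¬ s.2.contains rank = true then
        (s.1.insert hid (some rank), s.2.add rank)
      else s
  | none => s

def pvAStep2 (s : PySem.Dict String (Option Int) × List Int) (hid : String) :
    PySem.Dict String (Option Int) × List Int :=
  match s.1.get? hid with
  | some none =>
      match s.2 with
      | a :: rest => (s.1.insert hid (some a), rest)
      | [] => s           -- unreachable totalisation of available.pop(0)
  | _ => s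

def ensure_permutation_ranks (horse_ids : List String) (raw : List (String × Int)) : List (String × Int) :=
  let n : Int := PySem.List.len horse_ids
  let assigned : PySem.Dict String (Option Int) :=
    horse_ids.foldl (fun d hid => d.insert hid none) PySem.Dict.empty
  let s1 := horse_ids.foldl (pvAStep1 raw n) (assigned, (PySem.Set.empty : PySem.Set Int))
  let available := (PySem.List.pyRange 1 (n+1)).filter (fun r => ! s1.2.contains r)
  let s2 := horse_ids.foldl pvAStep2 (s1.1, available)
  (horse_ids.foldl (fun (d : PySem.Dict String Int) hid =>
      d.insert hid (match s2.1.get? hid with | some (some r) => r | _ => 0)) PySem.Dict.empty).items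

-- ===== PORT B =====
-- first pass over the horses: fill the inverse-permutation slot array slot[r] = horse
def pvBStep1 (raw : List (String × Int)) (n : Int)
    (s : List (Option String) × PySem.Set String) (hid : String) :
    List (Option String) × PySem.Set String :=
  if s.2.contains hid then s
  else
    match (PySem.Dict.mk raw).get? hid with
    | none => s              -- raw.get(hid) = None: int(None) raises → skip
    | some r =>
        if 1 ≤ r ∧ r ≤ n ∧ PySem.List.pyGetD s.1 r none = none then
          (PySem.List.pySetD s.1 r (some hid), s.2.add hid)
        else s

-- sweep over the ranks: an empty slot takes next(leftovers, None) (= head?) and the iterator advances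
def pvBStep2 (s : List (Option String) × List String) (r : Int) :
    List (Option String) × List String :=
  match PySem.List.pyGetD s.1 r none with
  | none => (PySem.List.pySetD s.1 r s.2.head?, s.2.tail)
  | some _ => s

def ensure_permutation_ranks_alt (horse_ids : List String) (raw : List (String × Int)) : List (String × Int) :=
  let n : Int := PySem.List.len horse_ids
  let s1 := horse_ids.foldl (pvBStep1 raw n)
      (List.replicate (horse_ids.length + 1) (none : Option String), (PySem.Set.empty : PySem.Set String))
  let leftovers := (PySem.List.dedup horse_ids).filter (fun h => ! s1.2.contains h)
  let slot := ((PySem.List.pyRange 1 (n+1)).foldl pvBStep2 (s1.1, leftovers)).1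
  let rank_of := (PySem.List.pyRange 1 (n+1)).foldl
      (fun (d : PySem.Dict String Int) r =>
        match PySem.List.pyGetD slot r none with
        | some h => d.insert h r
        | none => d) PySem.Dict.empty
  -- rank_of[hid]: every hid is in rank_of; getD 0 is an unreachable totalisation of the KeyError
  (horse_ids.foldl (fun (d : PySem.Dict String Int) hid =>
      d.insert hid (rank_of.getD hid 0)) PySem.Dict.empty).items

-- ===== PRECONDITION & SPEC =====
def Spec_ensure_permutation_ranks (horse_ids : List String) (raw : List (String × Int)) (out : List (String × Int)) : Prop := out = ensure_permutation_ranks_alt horse_ids raw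
instance (horse_ids : List String) (raw : List (String × Int)) (out : List (String × Int)) : Decidable (Spec_ensure_permutation_ranks horse_ids raw out) := by unfold Spec_ensure_permutation_ranks; infer_instance

-- ===== CLAIM (what is proved, stated in full; the proofs are below) =====
def Claim_equal_ensure_permutation_ranks : Prop := ∀ (horse_ids : List String) (raw : List (String × Int)), Dom_ensure_permutation_ranks horse_ids raw → Spec_ensure_permutation_ranks horse_ids raw (ensure_permutation_ranks horse_ids raw)

-- ===== LEMMAS AND PROOFS =====

-- proof-side MODEL of the common value: a horse→rank dict built like A's phase 1
-- (pvMStep1 mirrors A's validation on a dict + boolean rank array) and extended by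
-- zipping the leftover horses with the free ranks; both ports are proved equal to pvOut.
def pvMStep1 (raw : List (String × Int)) (n : Int)
    (s : PySem.Dict String Int × List Bool) (hid : String) :
    PySem.Dict String Int × List Bool :=
  if s.1.contains hid then s
  else
    match (PySem.Dict.mk raw).get? hid with
    | none => s
    | some r =>
        if 1 ≤ r ∧ r ≤ n ∧ ¬ PySem.List.pyGetD s.2 r false = true then
          (s.1.insert hid r, PySem.List.pySetD s.2 r true)
        else s

def pvS1M (hs : List String) (raw : List (String × Int)) : PySem.Dict String Int × List Bool :=
  hs.foldl (pvMStep1 raw (PySem.List.len hs))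
    ((PySem.Dict.empty : PySem.Dict String Int), List.replicate (hs.length + 1) false)

def pvFree (hs : List String) (raw : List (String × Int)) : List Int :=
  (PySem.List.pyRange 1 (PySem.List.len hs + 1)).filter
    (fun r => ! PySem.List.pyGetD (pvS1M hs raw).2 r false)

def pvPlaced (hs : List String) (raw : List (String × Int)) : PySem.Dict String Int :=
  (((PySem.List.dedup hs).filter (fun h => ! (pvS1M hs raw).1.contains h)).zip (pvFree hs raw)).foldl
    (fun d pr => d.insert pr.1 pr.2) (pvS1M hs raw).1

def pvOut (hs : List String) (raw : List (String × Int)) : List (String × Int) :=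
  (hs.foldl (fun (d : PySem.Dict String Int) hid =>
      d.insert hid ((pvPlaced hs raw).getD hid 0)) PySem.Dict.empty).items

-- leftover horses of l under map p, in first-occurrence order
def pvU (p : PySem.Dict String Int) (l : List String) : List String :=
  (PySem.List.dedup l).filter (fun h => ! p.contains h)

lemma pvSetContainsD {α : Type} [BEq α] [LawfulBEq α] (s : PySem.Set α) (y : α) :
    PySem.Set.contains s y = decide (y ∈ s) := by
  have := PySem.Set.contains_iff s y
  cases h : PySem.Set.contains s y <;> simp_all

lemma pvSetAddMem {α : Type} [BEq α] [LawfulBEq α] (s : PySem.Set α) (x : α) (h : x ∈ s) :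
    s.add x = s := by simp [PySem.Set.add, h]

lemma pvSetAddNotMem {α : Type} [BEq α] [LawfulBEq α] (s : PySem.Set α) (x : α) (h : ¬ x ∈ s) :
    s.add x = s ++ [x] := by simp [PySem.Set.add, h]

lemma pvFoldlAdd {α : Type} [BEq α] [LawfulBEq α] (xs : List α) :
    ∀ (s : PySem.Set α), xs.foldl PySem.Set.add s
      = s ++ (PySem.Set.ofList xs).filter (fun y => ! PySem.Set.contains s y) := by
  induction xs with
  | nil => intro s; simp [PySem.Set.ofList]
  | cons x xs ih =>
      intro s
      have hof : PySem.Set.ofList (x :: xs) = List.foldl PySem.Set.add [x] xs := by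
        simp [PySem.Set.ofList, PySem.Set.add, PySem.Set.empty, List.foldl_cons]
      rw [List.foldl_cons, ih, show PySem.Set.ofList (x :: xs)
          = [x] ++ (PySem.Set.ofList xs).filter (fun y => ! PySem.Set.contains [x] y) from by
        rw [hof, ih]]
      simp only [List.filter_append, List.filter_filter, pvSetContainsD]
      by_cases hx : x ∈ s
      · rw [pvSetAddMem s x hx]
        have h1 : List.filter (fun y => !decide (y ∈ s)) [x] = [] := by simp [hx]
        rw [h1]
        simp only [List.nil_append]
        congr 1
        apply List.filter_congr
        intro y _
        by_cases hys : y ∈ s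
        · simp [hys]
        · have : y ≠ x := fun hxy => hys (hxy ▸ hx)
          simp [hys, this]
      · rw [pvSetAddNotMem s x hx]
        have h1 : List.filter (fun y => !decide (y ∈ s)) [x] = [x] := by simp [hx]
        rw [h1, List.append_assoc]
        congr 1
        congr 1
        apply List.filter_congr
        intro y _
        by_cases hys : y ∈ s <;> by_cases hyx : y = x <;> simp [hys, hyx]

lemma pvDedupCons (x : String) (xs : List String) :
    PySem.List.dedup (x :: xs)
      = x :: (PySem.List.dedup xs).filter (fun y => ! decide (y = x)) := by
  have hof : PySem.Set.ofList (x :: xs) = List.foldl PySem.Set.add [x] xs := by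
    simp [PySem.Set.ofList, PySem.Set.add, PySem.Set.empty, List.foldl_cons]
  show PySem.Set.ofList (x :: xs) = _
  rw [hof, pvFoldlAdd]
  simp only [pvSetContainsD, List.mem_singleton, List.singleton_append, List.cons.injEq, true_and]
  apply List.filter_congr
  intro y _
  rfl

lemma pvU_cons_mem' (p : PySem.Dict String Int) (x : String) (xs : List String)
    (h : p.contains x = true) :
    (PySem.List.dedup (x :: xs)).filter (fun y => ! p.contains y)
    = (PySem.List.dedup xs).filter (fun y => ! p.contains y) := by
  rw [pvDedupCons]
  simp only [List.filter_cons, h, Bool.not_true, Bool.false_eq_true, if_false, List.filter_filter]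
  apply List.filter_congr
  intro y _
  by_cases hy : p.contains y = true
  · simp [hy]
  · have hyx : ¬ y = x := fun he => hy (he ▸ h)
    simp [hy, hyx]

lemma pvU_cons_new' (p : PySem.Dict String Int) (x : String) (xs : List String)
    (h : p.contains x = false) (v : Int) :
    (PySem.List.dedup (x :: xs)).filter (fun y => ! p.contains y)
    = x :: (PySem.List.dedup xs).filter (fun y => ! (p.insert x v).contains y) := by
  rw [pvDedupCons]
  simp only [List.filter_cons, h, Bool.not_false, if_true, List.filter_filter]
  congr 1
  apply List.filter_congr
  intro y _
  rw [PySem.Dict.contains_insert]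
  by_cases hyx : y = x <;> by_cases hy : p.contains y = true <;> simp [hyx, hy]

lemma pvDedupLength (xs : List String) :
    (PySem.List.dedup xs).length ≤ xs.length := by
  induction xs with
  | nil => simp [PySem.List.dedup, PySem.Set.ofList]
  | cons x xs ih =>
      rw [pvDedupCons]
      simp only [List.length_cons]
      have := List.length_filter_le (fun y => ! decide (y = x)) (PySem.List.dedup xs)
      omega

lemma pvU_cons_mem (p : PySem.Dict String Int) (x : String) (xs : List String)
    (h : p.contains x = true) : pvU p (x :: xs) = pvU p xs :=
  pvU_cons_mem' p x xs h

lemma pvU_cons_new (p : PySem.Dict String Int) (x : String) (xs : List String)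
    (h : p.contains x = false) (v : Int) :
    pvU p (x :: xs) = x :: pvU (p.insert x v) xs :=
  pvU_cons_new' p x xs h v

-- the phase-1 invariant between A's (assigned, used) and the model's (placed, taken)
def pvInv (hs : List String) (raw : List (String × Int))
    (a : PySem.Dict String (Option Int) × PySem.Set Int)
    (b : PySem.Dict String Int × List Bool) : Prop :=
  (∀ h, h ∈ hs → a.1.get? h = some (b.1.get? h)) ∧
  (∀ h, h ∉ hs → a.1.get? h = none ∧ b.1.get? h = none) ∧
  b.2.length = hs.length + 1 ∧
  (∀ r : Int, a.2.contains r = true ↔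
      (1 ≤ r ∧ r ≤ (hs.length : Int) ∧ PySem.List.pyGetD b.2 r false = true)) ∧
  (∀ h r, b.1.get? h = some r →
      (PySem.Dict.mk raw).get? h = some r ∧ a.2.contains r = true) ∧
  a.2.Nodup ∧ b.1.keys.Nodup ∧ b.1.keys.length = a.2.length

lemma pvStep1 (hs : List String) (raw : List (String × Int))
    (a : PySem.Dict String (Option Int) × PySem.Set Int)
    (b : PySem.Dict String Int × List Bool) (hid : String)
    (hhid : hid ∈ hs) (hinv : pvInv hs raw a b) :
    pvInv hs raw (pvAStep1 raw hs.length a hid) (pvMStep1 raw hs.length b hid) := by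
  obtain ⟨h1, h2, h3, h4, h5, h6, h7, h8⟩ := hinv
  by_cases hc : b.1.contains hid = true
  · -- already placed: both sides skip
    have hsome : (b.1.get? hid).isSome := by
      rw [← PySem.Dict.contains_eq_isSome_get?]; exact hc
    obtain ⟨r0, hr0⟩ := Option.isSome_iff_exists.mp hsome
    obtain ⟨hraw, hused⟩ := h5 hid r0 hr0
    have hB : pvMStep1 raw hs.length b hid = b := by simp [pvMStep1, hc]
    have hA : pvAStep1 raw hs.length a hid = a := by
      simp only [pvAStep1, hraw]
      rw [if_neg]
      rintro ⟨-, -, hno⟩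
      exact hno hused
    rw [hA, hB]
    exact ⟨h1, h2, h3, h4, h5, h6, h7, h8⟩
  · have hcf : b.1.contains hid = false := by simpa using hc
    have hbnone : b.1.get? hid = none := by
      have := PySem.Dict.contains_eq_isSome_get? b.1 hid
      rw [hcf] at this
      cases hg : b.1.get? hid with
      | none => rfl
      | some v => rw [hg] at this; simp at this
    cases hraw : (PySem.Dict.mk raw).get? hid with
    | none =>
        have hA : pvAStep1 raw hs.length a hid = a := by simp [pvAStep1, hraw]
        have hB : pvMStep1 raw hs.length b hid = b := by simp [pvMStep1, hcf, hraw]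
        rw [hA, hB]
        exact ⟨h1, h2, h3, h4, h5, h6, h7, h8⟩
    | some r =>
        have hcond : (1 ≤ r ∧ r ≤ (hs.length : Int) ∧ ¬ PySem.Set.contains a.2 r = true)
            ↔ (1 ≤ r ∧ r ≤ (hs.length : Int) ∧ ¬ PySem.List.pyGetD b.2 r false = true) := by
          constructor
          · rintro ⟨hb1, hb2, hn⟩
            exact ⟨hb1, hb2, fun hg => hn ((h4 r).mpr ⟨hb1, hb2, hg⟩)⟩
          · rintro ⟨hb1, hb2, hn⟩
            exact ⟨hb1, hb2, fun hg => hn ((h4 r).mp hg).2.2⟩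
        by_cases hcA : 1 ≤ r ∧ r ≤ (hs.length : Int) ∧ ¬ PySem.Set.contains a.2 r = true
        · have hcB := hcond.mp hcA
          obtain ⟨hr1, hr2, hnu⟩ := hcA
          have hA : pvAStep1 raw hs.length a hid = (a.1.insert hid (some r), a.2.add r) := by
            simp only [pvAStep1, hraw]
            rw [if_pos ⟨hr1, hr2, hnu⟩]
          have hB : pvMStep1 raw hs.length b hid
              = (b.1.insert hid r, b.2.set r.toNat true) := by
            simp only [pvMStep1, hcf, Bool.false_eq_true, if_false, hraw]
            rw [if_pos hcB, PySem.List.pySetD_of_nonneg b.2 true (by omega)]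
          rw [hA, hB]
          have hrmem : ¬ r ∈ a.2 := fun hm => hnu ((PySem.Set.contains_iff a.2 r).mpr hm)
          have hrn : r.toNat < b.2.length := by rw [h3]; omega
          have hgetset : ∀ r' : Int, 1 ≤ r' →
              PySem.List.pyGetD (b.2.set r.toNat true) r' false
                = if r' = r then true else PySem.List.pyGetD b.2 r' false := by
            intro r' hr'
            by_cases hlt : r' < (b.2.length : Int)
            · rw [PySem.List.pyGetD_eq_getElem _ _ (by omega) (by simpa using hlt),
                  PySem.List.pyGetD_eq_getElem _ _ (by omega) hlt]
              rw [List.getElem_set]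
              by_cases he : r' = r
              · subst he; simp
              · have : r.toNat ≠ r'.toNat := by omega
                simp [this, he]
            · have he : ¬ r' = r := by
                intro e; subst e; rw [h3] at hlt; omega
              have hout : ∀ (l : List Bool), l.length = b.2.length →
                  PySem.List.pyGetD l r' false = false := by
                intro l hl
                unfold PySem.List.pyGetD
                have hnone : PySem.List.pyGet? l r' = none := by
                  rw [PySem.List.pyGet?_eq_none_iff]
                  unfold PySem.Raise.InRange
                  rw [hl]
                  omega
                rw [hnone]
                rfl
              rw [hout _ (by simp), hout b.2 rfl, if_neg he]
          refine ⟨?_, ?_, ?_, ?_, ?_, ?_, ?_, ?_⟩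
          · intro h hm
            by_cases he : h = hid
            · subst he; simp [PySem.Dict.get?_insert_self]
            · rw [PySem.Dict.get?_insert_of_ne _ _ he,
                  PySem.Dict.get?_insert_of_ne _ _ he]
              exact h1 h hm
          · intro h hm
            have he : h ≠ hid := fun e => hm (e ▸ hhid)
            rw [PySem.Dict.get?_insert_of_ne _ _ he,
                PySem.Dict.get?_insert_of_ne _ _ he]
            exact h2 h hm
          · simpa using h3
          · intro r'
            rw [PySem.Set.contains_iff, PySem.Set.mem_add]
            constructor
            · rintro (hm | he)
              · obtain ⟨hb1, hb2, hg⟩ := (h4 r').mp ((PySem.Set.contains_iff a.2 r').mpr hm)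
                have hne : ¬ r' = r := fun e => hrmem (e ▸ hm)
                rw [hgetset r' hb1, if_neg hne]
                exact ⟨hb1, hb2, hg⟩
              · rw [he, hgetset r hr1, if_pos rfl]
                exact ⟨hr1, hr2, rfl⟩
            · rintro ⟨hb1, hb2, hg⟩
              by_cases he : r' = r
              · right; exact he
              · left
                rw [hgetset r' hb1, if_neg he] at hg
                exact (PySem.Set.contains_iff a.2 r').mp ((h4 r').mpr ⟨hb1, hb2, hg⟩)
          · intro h r0 hget
            by_cases he : h = hid
            · subst he
              rw [PySem.Dict.get?_insert_self] at hget
              obtain rfl : r = r0 := by simpa using hget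
              exact ⟨hraw, (PySem.Set.contains_iff _ _).mpr ((PySem.Set.mem_add _ _ _).mpr (Or.inr rfl))⟩
            · rw [PySem.Dict.get?_insert_of_ne _ _ he] at hget
              obtain ⟨hrw, hcon⟩ := h5 h r0 hget
              exact ⟨hrw, (PySem.Set.contains_iff _ _).mpr
                ((PySem.Set.mem_add _ _ _).mpr (Or.inl ((PySem.Set.contains_iff _ _).mp hcon)))⟩
          · exact PySem.Set.nodup_add _ _ h6
          · exact PySem.Dict.nodup_keys_insert _ _ _ h7
          · rw [PySem.Dict.keys_insert_of_not_contains _ _ hcf,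
                pvSetAddNotMem _ _ hrmem]
            simp only [List.length_append, List.length_singleton]
            omega
        · have hcB : ¬ (1 ≤ r ∧ r ≤ (hs.length : Int) ∧ ¬ PySem.List.pyGetD b.2 r false = true) :=
            fun h => hcA (hcond.mpr h)
          have hA : pvAStep1 raw hs.length a hid = a := by
            simp only [pvAStep1, hraw]; rw [if_neg hcA]
          have hB : pvMStep1 raw hs.length b hid = b := by
            simp only [pvMStep1, hcf, Bool.false_eq_true, if_false, hraw]; rw [if_neg hcB]
          rw [hA, hB]
          exact ⟨h1, h2, h3, h4, h5, h6, h7, h8⟩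

lemma pvPhase1 (hs : List String) (raw : List (String × Int)) :
    ∀ (l : List String), (∀ x ∈ l, x ∈ hs) →
    ∀ a b, pvInv hs raw a b →
    pvInv hs raw (l.foldl (pvAStep1 raw hs.length) a) (l.foldl (pvMStep1 raw hs.length) b) := by
  intro l
  induction l with
  | nil => intro _ a b h; exact h
  | cons x t ih =>
      intro hsub a b h
      exact ih (fun y hy => hsub y (List.mem_cons_of_mem _ hy))
        _ _ (pvStep1 hs raw a b x (hsub x List.mem_cons_self) h)

lemma pvPhase2 (hs : List String) :
    ∀ (l : List String) (p : PySem.Dict String Int)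
      (d : PySem.Dict String (Option Int)) (avail : List Int),
    (∀ x ∈ l, x ∈ hs) →
    (∀ h, h ∈ hs → d.get? h = some (p.get? h)) →
    (pvU p l).length ≤ avail.length →
    ∀ h, h ∈ hs →
      (l.foldl pvAStep2 (d, avail)).1.get? h
        = some ((((pvU p l).zip avail).foldl
            (fun d pr => d.insert pr.1 pr.2) p).get? h) := by
  intro l
  induction l with
  | nil =>
      intro p d avail hsub hd hlen h hm
      have hU : pvU p [] = [] := by simp [pvU, PySem.List.dedup, PySem.Set.ofList]
      rw [hU]
      simpa using hd h hm
  | cons hid rest ih =>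
      intro p d avail hsub hd hlen h hm
      have hhid : hid ∈ hs := hsub hid List.mem_cons_self
      by_cases hc : p.contains hid = true
      · have hsome : (p.get? hid).isSome := by
          rw [← PySem.Dict.contains_eq_isSome_get?]; exact hc
        obtain ⟨r0, hr0⟩ := Option.isSome_iff_exists.mp hsome
        have hstep : pvAStep2 (d, avail) hid = (d, avail) := by
          simp [pvAStep2, hd hid hhid, hr0]
        rw [List.foldl_cons, hstep, pvU_cons_mem p hid rest hc]
        exact ih p d avail (fun x hx => hsub x (List.mem_cons_of_mem _ hx)) hd
          (by rwa [pvU_cons_mem p hid rest hc] at hlen) h hm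
      · have hcf : p.contains hid = false := by simpa using hc
        have hpn : p.get? hid = none := by
          have := PySem.Dict.contains_eq_isSome_get? p hid
          rw [hcf] at this
          cases hg : p.get? hid with
          | none => rfl
          | some v => rw [hg] at this; simp at this
        cases avail with
        | nil =>
            exfalso
            rw [pvU_cons_new p hid rest hcf 0] at hlen
            simp at hlen
        | cons a arest =>
            have hstep : pvAStep2 (d, a :: arest) hid = (d.insert hid (some a), arest) := by
              simp [pvAStep2, hd hid hhid, hpn]
            rw [List.foldl_cons, hstep, pvU_cons_new p hid rest hcf a,
                List.zip_cons_cons, List.foldl_cons]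
            refine ih (p.insert hid a) (d.insert hid (some a)) arest
              (fun x hx => hsub x (List.mem_cons_of_mem _ hx)) ?_ ?_ h hm
            · intro h' hm'
              by_cases he : h' = hid
              · subst he
                rw [PySem.Dict.get?_insert_self, PySem.Dict.get?_insert_self]
              · rw [PySem.Dict.get?_insert_of_ne _ _ he, PySem.Dict.get?_insert_of_ne _ _ he]
                exact hd h' hm'
            · rw [pvU_cons_new p hid rest hcf a] at hlen
              simpa using hlen

-- named intermediate states of A's port (proof-side abbreviations, defeq to the port's lets)
def pvS1A (hs : List String) (raw : List (String × Int)) :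
    PySem.Dict String (Option Int) × PySem.Set Int :=
  hs.foldl (pvAStep1 raw (PySem.List.len hs))
    (hs.foldl (fun d hid => d.insert hid none) PySem.Dict.empty, (PySem.Set.empty : PySem.Set Int))

def pvAvail (hs : List String) (raw : List (String × Int)) : List Int :=
  (PySem.List.pyRange 1 (PySem.List.len hs + 1)).filter
    (fun r => ! PySem.Set.contains (pvS1A hs raw).2 r)

lemma pvInitGet : ∀ (l : List String) (d : PySem.Dict String (Option Int)) (x : String),
    (l.foldl (fun d h => d.insert h none) d).get? x = if x ∈ l then some none else d.get? x := by
  intro l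
  induction l with
  | nil => intro d x; simp
  | cons y t ih =>
      intro d x
      rw [List.foldl_cons, ih]
      by_cases hx : x ∈ t
      · simp [hx]
      · by_cases he : x = y
        · subst he; simp [hx, PySem.Dict.get?_insert_self]
        · simp [hx, he, PySem.Dict.get?_insert_of_ne _ _ he]

lemma pvGetDRep {α : Type} (m : Nat) (a : α) (r : Int) :
    PySem.List.pyGetD (List.replicate m a) r a = a := by
  unfold PySem.List.pyGetD
  cases hg : PySem.List.pyGet? (List.replicate m a) r with
  | none => rfl
  | some v =>
      have := PySem.List.mem_of_pyGet?_eq_some _ hg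
      rw [List.eq_of_mem_replicate this]
      rfl

lemma pvInvInit (hs : List String) (raw : List (String × Int)) :
    pvInv hs raw
      (hs.foldl (fun d hid => d.insert hid none) PySem.Dict.empty, (PySem.Set.empty : PySem.Set Int))
      ((PySem.Dict.empty : PySem.Dict String Int), List.replicate (hs.length + 1) false) := by
  refine ⟨?_, ?_, by simp, ?_, ?_, by simp [PySem.Set.empty], by simp, by simp [PySem.Set.empty]⟩
  · intro h hm
    rw [pvInitGet, if_pos hm, PySem.Dict.get?_empty]
  · intro h hm
    rw [pvInitGet, if_neg hm, PySem.Dict.get?_empty]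
    exact ⟨rfl, rfl⟩
  · intro r
    rw [pvGetDRep]
    constructor
    · intro hc
      have := (PySem.Set.contains_iff ([] : PySem.Set Int) r).mp hc
      simp at this
    · rintro ⟨-, -, h⟩
      exact absurd h (by simp)
  · intro h r hget
    rw [PySem.Dict.get?_empty] at hget
    exact absurd hget (by simp)

-- two Nodup lists with the same members have the same length
lemma pvLenEqOfMemIff {α : Type} [DecidableEq α] (l l' : List α)
    (hl : l.Nodup) (hl' : l'.Nodup) (h : ∀ x, x ∈ l ↔ x ∈ l') : l.length = l'.length :=
  Nat.le_antisymm
    (List.Subperm.length_le (List.subperm_of_subset hl (fun x hx => (h x).mp hx)))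
    (List.Subperm.length_le (List.subperm_of_subset hl' (fun x hx => (h x).mpr hx)))

-- the A↔model invariant after phase 1
lemma pvInvMain (hs : List String) (raw : List (String × Int)) :
    pvInv hs raw (pvS1A hs raw) (pvS1M hs raw) := by
  unfold pvS1A pvS1M
  simp only [PySem.List.len_eq]
  exact pvPhase1 hs raw hs (fun _ hx => hx) _ _ (pvInvInit hs raw)

-- the two free-rank lists coincide
lemma pvFreeEq (hs : List String) (raw : List (String × Int)) :
    pvAvail hs raw = pvFree hs raw := by
  obtain ⟨h1, h2, h3, h4, h5, h6, h7, h8⟩ := pvInvMain hs raw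
  unfold pvAvail pvFree
  apply List.filter_congr
  intro r hr
  have hb := PySem.List.mem_pyRange_one.mp hr
  simp only [PySem.List.len_eq] at hb
  have := h4 r
  cases hc : PySem.Set.contains (pvS1A hs raw).2 r <;>
    cases hg : PySem.List.pyGetD (pvS1M hs raw).2 r false <;> simp_all

-- enough free ranks for every leftover horse
lemma pvLenFree (hs : List String) (raw : List (String × Int)) :
    (pvU (pvS1M hs raw).1 hs).length ≤ (pvFree hs raw).length := by
  obtain ⟨h1, h2, h3, h4, h5, h6, h7, h8⟩ := pvInvMain hs raw
  rw [← pvFreeEq]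
  have hKsub : ∀ h ∈ (pvS1M hs raw).1.keys, h ∈ hs := by
    intro h hk
    by_contra hm
    exact absurd ((PySem.Dict.get?_eq_none_iff_not_mem_keys _ _).mp (h2 h hm).2) (by simp [hk])
  have e2 : ((PySem.List.dedup hs).filter (fun h => (pvS1M hs raw).1.contains h)).length
      = (pvS1M hs raw).1.keys.length := by
    apply pvLenEqOfMemIff _ _ ((PySem.List.nodup_dedup hs).filter _) h7
    intro x
    simp only [List.mem_filter, PySem.List.mem_dedup]
    constructor
    · rintro ⟨-, hc⟩
      exact (PySem.Dict.contains_iff_mem_keys _ _).mp hc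
    · intro hk
      exact ⟨hKsub x hk, (PySem.Dict.contains_iff_mem_keys _ _).mpr hk⟩
  have e4 : ((PySem.List.pyRange 1 ((hs.length : Int) + 1)).filter
      (fun r => PySem.Set.contains (pvS1A hs raw).2 r)).length
      = (pvS1A hs raw).2.length := by
    apply pvLenEqOfMemIff _ _ ((PySem.List.nodup_pyRange_one _ _).filter _) h6
    intro r
    simp only [List.mem_filter]
    constructor
    · rintro ⟨-, hc⟩
      exact (PySem.Set.contains_iff _ _).mp hc
    · intro hm
      have hc := (PySem.Set.contains_iff _ _).mpr hm
      obtain ⟨hb1, hb2, -⟩ := (h4 r).mp hc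
      exact ⟨PySem.List.mem_pyRange_one.mpr ⟨by omega, by omega⟩, hc⟩
  have e1 := List.length_eq_length_filter_add
    (l := PySem.List.dedup hs) (fun h => (pvS1M hs raw).1.contains h)
  have e3 := List.length_eq_length_filter_add
    (l := PySem.List.pyRange 1 ((hs.length : Int) + 1))
    (fun r => PySem.Set.contains (pvS1A hs raw).2 r)
  have e5 : (PySem.List.pyRange 1 ((hs.length : Int) + 1)).length = hs.length := by
    rw [PySem.List.length_pyRange_one]
    omega
  have hdl := pvDedupLength hs
  unfold pvAvail
  unfold pvU
  simp only [PySem.List.len_eq]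
  omega

-- A's port computes the model output
lemma pvAeq (hs : List String) (raw : List (String × Int)) :
    ensure_permutation_ranks hs raw = pvOut hs raw := by
  obtain ⟨h1, h2, h3, h4, h5, h6, h7, h8⟩ := pvInvMain hs raw
  have hlen : (pvU (pvS1M hs raw).1 hs).length ≤ (pvAvail hs raw).length := by
    rw [pvFreeEq]; exact pvLenFree hs raw
  have hmain : ∀ h, h ∈ hs →
      (hs.foldl pvAStep2 ((pvS1A hs raw).1, pvAvail hs raw)).1.get? h
        = some ((pvPlaced hs raw).get? h) := by
    intro h hm
    have := pvPhase2 hs hs (pvS1M hs raw).1 (pvS1A hs raw).1 (pvAvail hs raw)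
      (fun _ hx => hx) h1 hlen h hm
    rw [this]
    unfold pvPlaced pvU
    rw [pvFreeEq]
  show (hs.foldl (fun (d : PySem.Dict String Int) hid =>
      d.insert hid (match (hs.foldl pvAStep2 ((pvS1A hs raw).1, pvAvail hs raw)).1.get? hid with
        | some (some r) => r | _ => 0)) PySem.Dict.empty).items
    = (hs.foldl (fun (d : PySem.Dict String Int) hid =>
      d.insert hid ((pvPlaced hs raw).getD hid 0)) PySem.Dict.empty).items
  congr 1
  apply PySem.List.foldl_congr_mem
  intro acc hid hm
  congr 1
  rw [hmain hid hm, PySem.Dict.getD_eq_get?_getD]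
  cases hg : (pvPlaced hs raw).get? hid with
  | none => rfl
  | some r => rfl

-- ════════ B side: the rank-indexed slot array computes the same model output ════════

-- named intermediate states of B's port (defeq to the port's lets)
def pvS1B (hs : List String) (raw : List (String × Int)) :
    List (Option String) × PySem.Set String :=
  hs.foldl (pvBStep1 raw (PySem.List.len hs))
    (List.replicate (hs.length + 1) (none : Option String), (PySem.Set.empty : PySem.Set String))

def pvLeft (hs : List String) (raw : List (String × Int)) : List String :=
  (PySem.List.dedup hs).filter (fun h => ! (pvS1B hs raw).2.contains h)

def pvSlot (hs : List String) (raw : List (String × Int)) : List (Option String) :=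
  ((PySem.List.pyRange 1 (PySem.List.len hs + 1)).foldl pvBStep2 ((pvS1B hs raw).1, pvLeft hs raw)).1

def pvRank (hs : List String) (raw : List (String × Int)) : PySem.Dict String Int :=
  (PySem.List.pyRange 1 (PySem.List.len hs + 1)).foldl
    (fun (d : PySem.Dict String Int) r =>
      match PySem.List.pyGetD (pvSlot hs raw) r none with
      | some h => d.insert h r
      | none => d) PySem.Dict.empty

-- the B↔model phase-1 invariant: the slot array is the inverse of the placed map
def pvJ (nn : Nat) (b : List (Option String) × PySem.Set String)
    (m : PySem.Dict String Int × List Bool) : Prop :=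
  b.1.length = nn + 1 ∧ m.2.length = nn + 1 ∧
  (∀ h, b.2.contains h = m.1.contains h) ∧
  (∀ r : Int, 0 ≤ r → (PySem.List.pyGetD b.1 r none = none ↔ PySem.List.pyGetD m.2 r false = false)) ∧
  (∀ (r : Int) (h : String), 0 ≤ r → (PySem.List.pyGetD b.1 r none = some h ↔ m.1.get? h = some r)) ∧
  (∀ h r, m.1.get? h = some r → 1 ≤ r ∧ r ≤ (nn : Int))

lemma pvGetSet {α : Type} (l : List α) (d v : α) (r r' : Int)
    (h1 : 0 ≤ r) (h2 : r.toNat < l.length) (h3 : 0 ≤ r') :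
    PySem.List.pyGetD (PySem.List.pySetD l r v) r' d
      = if r' = r then v else PySem.List.pyGetD l r' d := by
  rw [PySem.List.pySetD_of_nonneg l v h1]
  by_cases hr' : 0 ≤ r' ∧ r' < (l.length : Int)
  · rw [PySem.List.pyGetD_eq_getElem _ _ hr'.1 (by simpa using hr'.2),
        PySem.List.pyGetD_eq_getElem _ _ hr'.1 hr'.2]
    rw [List.getElem_set]
    by_cases he : r' = r
    · subst he; simp
    · have : r.toNat ≠ r'.toNat := by omega
      simp [this, he]
  · have he : ¬ r' = r := by intro e; subst e; omega
    have hout : ∀ (l' : List α), l'.length = l.length →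
        PySem.List.pyGetD l' r' d = d := by
      intro l' hl
      unfold PySem.List.pyGetD
      have hnone : PySem.List.pyGet? l' r' = none := by
        rw [PySem.List.pyGet?_eq_none_iff]
        unfold PySem.Raise.InRange
        rw [hl]
        omega
      rw [hnone]
      rfl
    rw [hout _ (by simp), hout l rfl, if_neg he]

lemma pvJStep (raw : List (String × Int)) (nn : Nat)
    (b : List (Option String) × PySem.Set String)
    (m : PySem.Dict String Int × List Bool) (hid : String)
    (hj : pvJ nn b m) :
    pvJ nn (pvBStep1 raw (nn : Int) b hid) (pvMStep1 raw (nn : Int) m hid) := by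
  obtain ⟨j1, j2, j3, j4, j5, j6⟩ := hj
  by_cases hc : m.1.contains hid = true
  · have hbt : b.2.contains hid = true := by rw [j3]; exact hc
    have hmem : hid ∈ b.2 := (PySem.Set.contains_iff _ _).mp hbt
    have hB : pvBStep1 raw (nn : Int) b hid = b := by simp [pvBStep1, hmem]
    have hM : pvMStep1 raw (nn : Int) m hid = m := by simp [pvMStep1, hc]
    rw [hB, hM]; exact ⟨j1, j2, j3, j4, j5, j6⟩
  · have hcf : m.1.contains hid = false := by simpa using hc
    have hbc : b.2.contains hid = false := by rw [j3]; exact hcf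
    have hmn : m.1.get? hid = none := by
      have := PySem.Dict.contains_eq_isSome_get? m.1 hid
      rw [hcf] at this
      cases hg : m.1.get? hid with
      | none => rfl
      | some v => rw [hg] at this; simp at this
    cases hraw : (PySem.Dict.mk raw).get? hid with
    | none =>
        have hB : pvBStep1 raw (nn : Int) b hid = b := by simp [pvBStep1, hraw]
        have hM : pvMStep1 raw (nn : Int) m hid = m := by simp [pvMStep1, hraw]
        rw [hB, hM]; exact ⟨j1, j2, j3, j4, j5, j6⟩
    | some r =>
        have hcond : (1 ≤ r ∧ r ≤ (nn : Int) ∧ PySem.List.pyGetD b.1 r none = none)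
            ↔ (1 ≤ r ∧ r ≤ (nn : Int) ∧ ¬ PySem.List.pyGetD m.2 r false = true) := by
          constructor
          · rintro ⟨a1, a2, a3⟩
            refine ⟨a1, a2, ?_⟩
            have := (j4 r (by omega)).mp a3
            simp [this]
          · rintro ⟨a1, a2, a3⟩
            refine ⟨a1, a2, (j4 r (by omega)).mpr ?_⟩
            cases hg : PySem.List.pyGetD m.2 r false
            · rfl
            · exact absurd hg a3
        by_cases hcB : 1 ≤ r ∧ r ≤ (nn : Int) ∧ PySem.List.pyGetD b.1 r none = none
        · have hcM := hcond.mp hcB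
          obtain ⟨hr1, hr2, hempty⟩ := hcB
          have hrn : r.toNat < b.1.length := by rw [j1]; omega
          have hB : pvBStep1 raw (nn : Int) b hid
              = (PySem.List.pySetD b.1 r (some hid), b.2.add hid) := by
            simp only [pvBStep1, hbc, Bool.false_eq_true, if_false, hraw]
            rw [if_pos ⟨hr1, hr2, hempty⟩]
          have hM : pvMStep1 raw (nn : Int) m hid
              = (m.1.insert hid r, PySem.List.pySetD m.2 r true) := by
            simp only [pvMStep1, hcf, Bool.false_eq_true, if_false, hraw]
            rw [if_pos hcM]
          rw [hB, hM]
          have hrnM : r.toNat < m.2.length := by rw [j2]; omega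
          refine ⟨by simp [PySem.List.pySetD_of_nonneg _ _ (by omega : (0:Int) ≤ r), j1],
                  by simp [PySem.List.pySetD_of_nonneg _ _ (by omega : (0:Int) ≤ r), j2],
                  ?_, ?_, ?_, ?_⟩
          · intro h
            rw [pvSetContainsD, PySem.Dict.contains_insert]
            have hj := j3 h
            rw [pvSetContainsD] at hj
            by_cases he : h = hid
            · subst he; simp [PySem.Set.mem_add]
            · simp [PySem.Set.mem_add, he, hj]
          · intro r' hr0'
            rw [pvGetSet b.1 none (some hid) r r' (by omega) hrn hr0',
                pvGetSet m.2 false true r r' (by omega) hrnM hr0']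
            by_cases he : r' = r
            · simp [he]
            · rw [if_neg he, if_neg he]
              exact j4 r' hr0'
          · intro r' h hr0'
            rw [pvGetSet b.1 none (some hid) r r' (by omega) hrn hr0']
            by_cases he : r' = r
            · subst he
              rw [if_pos rfl]
              constructor
              · intro hh
                obtain rfl : hid = h := by simpa using hh
                rw [PySem.Dict.get?_insert_self]
              · intro hh
                by_cases hhe : h = hid
                · subst hhe; simp
                · rw [PySem.Dict.get?_insert_of_ne _ _ hhe] at hh
                  exact absurd ((j5 r' h hr0').mpr hh) (by simp [hempty])
            · rw [if_neg he]
              constructor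
              · intro hh
                have hm := (j5 r' h hr0').mp hh
                have hhe : h ≠ hid := by
                  intro e; subst e; rw [hmn] at hm; simp at hm
                rw [PySem.Dict.get?_insert_of_ne _ _ hhe]
                exact hm
              · intro hh
                by_cases hhe : h = hid
                · subst hhe
                  rw [PySem.Dict.get?_insert_self] at hh
                  obtain rfl : r = r' := by simpa using hh
                  exact absurd rfl he
                · rw [PySem.Dict.get?_insert_of_ne _ _ hhe] at hh
                  exact (j5 r' h hr0').mpr hh
          · intro h r' hh
            by_cases hhe : h = hid
            · subst hhe
              rw [PySem.Dict.get?_insert_self] at hh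
              obtain rfl : r = r' := by simpa using hh
              exact ⟨hr1, hr2⟩
            · rw [PySem.Dict.get?_insert_of_ne _ _ hhe] at hh
              exact j6 h r' hh
        · have hcM : ¬ (1 ≤ r ∧ r ≤ (nn : Int) ∧ ¬ PySem.List.pyGetD m.2 r false = true) :=
            fun h => hcB (hcond.mpr h)
          have hB : pvBStep1 raw (nn : Int) b hid = b := by
            simp only [pvBStep1, hbc, Bool.false_eq_true, if_false, hraw]
            rw [if_neg hcB]
          have hM : pvMStep1 raw (nn : Int) m hid = m := by
            simp only [pvMStep1, hcf, Bool.false_eq_true, if_false, hraw]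
            rw [if_neg hcM]
          rw [hB, hM]; exact ⟨j1, j2, j3, j4, j5, j6⟩

lemma pvJPhase (raw : List (String × Int)) (nn : Nat) :
    ∀ (l : List String) b m, pvJ nn b m →
    pvJ nn (l.foldl (pvBStep1 raw (nn : Int)) b) (l.foldl (pvMStep1 raw (nn : Int)) m) := by
  intro l
  induction l with
  | nil => intro b m h; exact h
  | cons x t ih =>
      intro b m h
      exact ih _ _ (pvJStep raw nn b m x h)

lemma pvJInit (hs : List String) :
    pvJ hs.length
      (List.replicate (hs.length + 1) (none : Option String), (PySem.Set.empty : PySem.Set String))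
      ((PySem.Dict.empty : PySem.Dict String Int), List.replicate (hs.length + 1) false) := by
  refine ⟨by simp, by simp, ?_, ?_, ?_, ?_⟩
  · intro h
    rw [pvSetContainsD]
    simp [PySem.Set.empty]
  · intro r _
    rw [pvGetDRep, pvGetDRep]
    simp
  · intro r h _
    rw [pvGetDRep, PySem.Dict.get?_empty]
    simp
  · intro h r hh
    rw [PySem.Dict.get?_empty] at hh
    exact absurd hh (by simp)

lemma pvJMain (hs : List String) (raw : List (String × Int)) :
    pvJ hs.length (pvS1B hs raw) (pvS1M hs raw) := by
  unfold pvS1B pvS1M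
  simp only [PySem.List.len_eq]
  exact pvJPhase raw hs.length hs _ _ (pvJInit hs)

-- B's free ranks, read off the slot array
def pvFreeB (hs : List String) (raw : List (String × Int)) : List Int :=
  (PySem.List.pyRange 1 (PySem.List.len hs + 1)).filter
    (fun r => (PySem.List.pyGetD (pvS1B hs raw).1 r none).isNone)

lemma pvFreeBEq (hs : List String) (raw : List (String × Int)) :
    pvFreeB hs raw = pvFree hs raw := by
  obtain ⟨j1, j2, j3, j4, j5, j6⟩ := pvJMain hs raw
  unfold pvFreeB pvFree
  apply List.filter_congr
  intro r hrm
  have hb := PySem.List.mem_pyRange_one.mp hrm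
  have := j4 r (by omega)
  cases hg : PySem.List.pyGetD (pvS1B hs raw).1 r none <;>
    cases hm : PySem.List.pyGetD (pvS1M hs raw).2 r false <;> simp_all

lemma pvLeftEq (hs : List String) (raw : List (String × Int)) :
    pvLeft hs raw = pvU (pvS1M hs raw).1 hs := by
  obtain ⟨j1, j2, j3, j4, j5, j6⟩ := pvJMain hs raw
  unfold pvLeft pvU
  apply List.filter_congr
  intro h _
  rw [j3]

-- phase-2 characterization: the rank sweep writes the zip of the free ranks with the leftovers
lemma pvP2 : ∀ (R : List Int) (slot : List (Option String)) (L : List String),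
    R.Nodup → (∀ r ∈ R, 0 ≤ r ∧ r.toNat < slot.length) →
    (R.foldl pvBStep2 (slot, L)).1
      = ((R.filter (fun r => (PySem.List.pyGetD slot r none).isNone)).zip L).foldl
          (fun s q => PySem.List.pySetD s q.1 (some q.2)) slot := by
  intro R
  induction R with
  | nil => intro slot L _ _; simp
  | cons r R' ih =>
      intro slot L hnd hbnd
      have hr := hbnd r List.mem_cons_self
      have hnd' : R'.Nodup := (List.nodup_cons.mp hnd).2
      have hrnot : r ∉ R' := (List.nodup_cons.mp hnd).1
      rw [List.foldl_cons, List.filter_cons]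
      cases hg : PySem.List.pyGetD slot r none with
      | some h0 =>
          have hstep : pvBStep2 (slot, L) r = (slot, L) := by simp [pvBStep2, hg]
          rw [hstep, ih slot L hnd' (fun q hq => hbnd q (List.mem_cons_of_mem _ hq))]
          simp
      | none =>
          simp only [Option.isNone_none, if_pos]
          cases L with
          | nil =>
              have hstep : pvBStep2 (slot, ([] : List String)) r
                  = (PySem.List.pySetD slot r none, []) := by simp [pvBStep2, hg]
              have hsame : PySem.List.pySetD slot r none = slot := by
                rw [PySem.List.pySetD_of_nonneg _ _ hr.1]
                apply List.ext_getElem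
                · simp
                · intro i hi hi'
                  rw [List.getElem_set]
                  by_cases he : r.toNat = i
                  · subst he
                    rw [if_pos rfl, ← PySem.List.pyGetD_eq_getElem slot none hr.1 (by omega)] at *
                    exact hg.symm
                  · rw [if_neg he]
              rw [hstep, hsame, ih slot [] hnd' (fun q hq => hbnd q (List.mem_cons_of_mem _ hq))]
              simp
          | cons h L' =>
              have hstep : pvBStep2 (slot, h :: L') r
                  = (PySem.List.pySetD slot r (some h), L') := by simp [pvBStep2, hg]
              rw [hstep, ih _ L' hnd' (fun q hq => by
                have := hbnd q (List.mem_cons_of_mem _ hq)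
                rwa [PySem.List.pySetD_of_nonneg _ _ hr.1, List.length_set])]
              rw [List.zip_cons_cons, List.foldl_cons]
              congr 2
              apply List.filter_congr
              intro r' hr'
              have hne : r' ≠ r := fun e => hrnot (e ▸ hr')
              have hr0' := (hbnd r' (List.mem_cons_of_mem _ hr')).1
              rw [pvGetSet slot none (some h) r r' hr.1 hr.2 hr0', if_neg hne]

-- the inverse-array / dict correspondence
def pvCorr (slot : List (Option String)) (p : PySem.Dict String Int) : Prop :=
  ∀ (r : Int) (h : String), 0 ≤ r →
    (PySem.List.pyGetD slot r none = some h ↔ p.get? h = some r)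

-- correspondence is preserved by writing fresh (rank, horse) pairs on both sides
lemma pvP3 : ∀ (ps : List (Int × String)) (slot : List (Option String)) (p : PySem.Dict String Int),
    pvCorr slot p →
    (∀ q ∈ ps, PySem.List.pyGetD slot q.1 none = none ∧ 0 ≤ q.1 ∧ q.1.toNat < slot.length
        ∧ p.get? q.2 = none) →
    (ps.map Prod.fst).Nodup → (ps.map Prod.snd).Nodup →
    pvCorr (ps.foldl (fun s q => PySem.List.pySetD s q.1 (some q.2)) slot)
           (ps.foldl (fun d q => d.insert q.2 q.1) p) := by
  intro ps
  induction ps with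
  | nil => intro slot p hc _ _ _; exact hc
  | cons q ps' ih =>
      intro slot p hc hfresh hnd1 hnd2
      rw [List.map_cons, List.nodup_cons] at hnd1 hnd2
      obtain ⟨hq0, hq1, hq2, hq3⟩ := hfresh q List.mem_cons_self
      rw [List.foldl_cons, List.foldl_cons]
      apply ih
      · -- one write preserves the correspondence
        intro r h hr0
        rw [pvGetSet slot none (some q.2) q.1 r hq1 hq2 hr0]
        by_cases he : r = q.1
        · subst he
          rw [if_pos rfl]
          constructor
          · intro hh
            obtain rfl : q.2 = h := by simpa using hh
            rw [PySem.Dict.get?_insert_self]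
          · intro hh
            by_cases hhe : h = q.2
            · subst hhe; simp
            · rw [PySem.Dict.get?_insert_of_ne _ _ hhe] at hh
              exact absurd ((hc q.1 h hr0).mpr hh) (by simp [hq0])
        · rw [if_neg he]
          constructor
          · intro hh
            have hm := (hc r h hr0).mp hh
            have hhe : h ≠ q.2 := by
              intro e; subst e; rw [hq3] at hm; simp at hm
            rw [PySem.Dict.get?_insert_of_ne _ _ hhe]
            exact hm
          · intro hh
            by_cases hhe : h = q.2
            · subst hhe
              rw [PySem.Dict.get?_insert_self] at hh
              obtain rfl : q.1 = r := by simpa using hh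
              exact absurd rfl (Ne.symm he)
            · rw [PySem.Dict.get?_insert_of_ne _ _ hhe] at hh
              exact (hc r h hr0).mpr hh
      · intro q' hq'
        obtain ⟨f0, f1, f2, f3⟩ := hfresh q' (List.mem_cons_of_mem _ hq')
        have hne1 : q'.1 ≠ q.1 := by
          intro e
          exact hnd1.1 (e ▸ List.mem_map_of_mem (f := Prod.fst) hq')
        have hne2 : q'.2 ≠ q.2 := by
          intro e
          exact hnd2.1 (e ▸ List.mem_map_of_mem (f := Prod.snd) hq')
        refine ⟨?_, f1, ?_, ?_⟩
        · rw [pvGetSet slot none (some q.2) q.1 q'.1 hq1 hq2 f1, if_neg hne1]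
          exact f0
        · rwa [PySem.List.pySetD_of_nonneg _ _ hq1, List.length_set]
        · rw [PySem.Dict.get?_insert_of_ne _ _ hne2]
          exact f3
      · exact hnd1.2
      · exact hnd2.2

-- the two orientations of the zip fold build the same dict
lemma pvZipSwap : ∀ (L : List String) (F : List Int) (p : PySem.Dict String Int),
    ((L.zip F).foldl (fun d pr => d.insert pr.1 pr.2) p)
      = ((F.zip L).foldl (fun d q => d.insert q.2 q.1) p) := by
  intro L
  induction L with
  | nil => intro F p; cases F <;> simp
  | cons h L' ih =>
      intro F p
      cases F with
      | nil => simp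
      | cons r F' => simp [ih]

-- a fold of inserts whose keys avoid h leaves get? h unchanged
lemma pvFoldPreserve : ∀ (ps : List (Int × String)) (p : PySem.Dict String Int) (h : String),
    (∀ q ∈ ps, q.2 ≠ h) →
    ((ps.foldl (fun d q => d.insert q.2 q.1) p).get? h = p.get? h) := by
  intro ps
  induction ps with
  | nil => intro p h _; rfl
  | cons q ps' ih =>
      intro p h hne
      rw [List.foldl_cons, ih _ _ (fun q' hq' => hne q' (List.mem_cons_of_mem _ hq')),
          PySem.Dict.get?_insert_of_ne _ _ (Ne.symm (hne q List.mem_cons_self))]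

-- values of the fold stay within a bound satisfied by p and the written ranks
lemma pvFoldVals : ∀ (ps : List (Int × String)) (p : PySem.Dict String Int) (P : Int → Prop),
    (∀ h r, p.get? h = some r → P r) → (∀ q ∈ ps, P q.1) →
    ∀ h r, ((ps.foldl (fun d q => d.insert q.2 q.1) p).get? h = some r) → P r := by
  intro ps
  induction ps with
  | nil => intro p P hp _ h r hh; exact hp h r hh
  | cons q ps' ih =>
      intro p P hp hq h r hh
      refine ih _ P ?_ (fun q' hq' => hq q' (List.mem_cons_of_mem _ hq')) h r hh
      intro h' r' hh'
      by_cases he : h' = q.2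
      · subst he
        rw [PySem.Dict.get?_insert_self] at hh'
        obtain rfl : q.1 = r' := by simpa using hh'
        exact hq q List.mem_cons_self
      · rw [PySem.Dict.get?_insert_of_ne _ _ he] at hh'
        exact hp h' r' hh'

-- every horse of a Nodup leftover list covered by the free ranks is inserted
lemma pvZipCovers : ∀ (L : List String) (F : List Int) (p : PySem.Dict String Int),
    L.Nodup → L.length ≤ F.length →
    ∀ h ∈ L, ∃ r ∈ F, ((F.zip L).foldl (fun d q => d.insert q.2 q.1) p).get? h = some r := by
  intro L
  induction L with
  | nil => intro F p _ _ h hm; exact absurd hm (by simp)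
  | cons h0 L' ih =>
      intro F p hnd hlen h hm
      cases F with
      | nil => simp at hlen
      | cons r0 F' =>
          rw [List.zip_cons_cons, List.foldl_cons]
          by_cases he : h = h0
          · subst he
            refine ⟨r0, List.mem_cons_self, ?_⟩
            rw [pvFoldPreserve _ _ h (fun q hq => by
              have := (List.of_mem_zip hq).2
              intro e
              exact (List.nodup_cons.mp hnd).1 (e ▸ this))]
            rw [PySem.Dict.get?_insert_self]
          · obtain ⟨r, hrm, hr⟩ := ih F' (p.insert h0 r0) (List.nodup_cons.mp hnd).2
              (by simpa using hlen) h (by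
                cases List.mem_cons.mp hm with
                | inl e => exact absurd e he
                | inr hmm => exact hmm)
            exact ⟨r, List.mem_cons_of_mem _ hrm, hr⟩

-- the slot-based ranks agree with the dict: reading the rank back off the sweep
lemma pvRankNone (slot : List (Option String)) (h : String) :
    ∀ (Rl : List Int) (acc : PySem.Dict String Int),
    (∀ r' ∈ Rl, PySem.List.pyGetD slot r' none ≠ some h) →
    ((Rl.foldl (fun (d : PySem.Dict String Int) r =>
        match PySem.List.pyGetD slot r none with
        | some h' => d.insert h' r
        | none => d) acc).get? h = acc.get? h) := by
  intro Rl
  induction Rl with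
  | nil => intro acc _; rfl
  | cons r Rl' ih =>
      intro acc hne
      rw [List.foldl_cons]
      cases hg : PySem.List.pyGetD slot r none with
      | none => exact ih _ (fun r' hr' => hne r' (List.mem_cons_of_mem _ hr'))
      | some h' =>
          rw [ih _ (fun r' hr' => hne r' (List.mem_cons_of_mem _ hr'))]
          have : h' ≠ h := fun e => hne r List.mem_cons_self (e ▸ hg)
          rw [PySem.Dict.get?_insert_of_ne _ _ (Ne.symm this)]

lemma pvRankOf (slot : List (Option String)) (h : String) (r : Int) :
    ∀ (Rl : List Int) (acc : PySem.Dict String Int),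
    Rl.Nodup → r ∈ Rl → PySem.List.pyGetD slot r none = some h →
    (∀ r' ∈ Rl, PySem.List.pyGetD slot r' none = some h → r' = r) →
    ((Rl.foldl (fun (d : PySem.Dict String Int) r =>
        match PySem.List.pyGetD slot r none with
        | some h' => d.insert h' r
        | none => d) acc).get? h = some r) := by
  intro Rl
  induction Rl with
  | nil => intro acc _ hm; exact absurd hm (by simp)
  | cons r0 Rl' ih =>
      intro acc hnd hm hg huniq
      rw [List.foldl_cons]
      by_cases he : r0 = r
      · subst he
        rw [hg, pvRankNone slot h Rl' _ (fun r' hr' hg' => by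
          have := huniq r' (List.mem_cons_of_mem _ hr') hg'
          exact (List.nodup_cons.mp hnd).1 (this ▸ hr'))]
        rw [PySem.Dict.get?_insert_self]
      · have hm' : r ∈ Rl' := by
          cases List.mem_cons.mp hm with
          | inl e => exact absurd e.symm he
          | inr hmm => exact hmm
        exact ih _ (List.nodup_cons.mp hnd).2 hm' hg
          (fun r' hr' hg' => huniq r' (List.mem_cons_of_mem _ hr') hg')

-- nodup transfer through zip projections
lemma pvZipFstSublist {α β : Type} : ∀ (l : List α) (l' : List β),
    ((l.zip l').map Prod.fst).Sublist l := by
  intro l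
  induction l with
  | nil => intro l'; simp
  | cons a l ih =>
      intro l'
      cases l' with
      | nil => simp
      | cons b l' => simpa using (ih l').cons₂ a

lemma pvZipSndSublist {α β : Type} : ∀ (l : List α) (l' : List β),
    ((l.zip l').map Prod.snd).Sublist l' := by
  intro l
  induction l with
  | nil => intro l'; simp
  | cons a l ih =>
      intro l'
      cases l' with
      | nil => simp
      | cons b l' => simpa using (ih l').cons₂ b

-- B's port computes the model output
lemma pvBeq (hs : List String) (raw : List (String × Int)) :
    ensure_permutation_ranks_alt hs raw = pvOut hs raw := by
  obtain ⟨j1, j2, j3, j4, j5, j6⟩ := pvJMain hs raw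
  -- the final slot array
  have hRnd : (PySem.List.pyRange 1 ((hs.length : Int) + 1)).Nodup :=
    PySem.List.nodup_pyRange_one _ _
  have hRbnd : ∀ r ∈ PySem.List.pyRange 1 ((hs.length : Int) + 1),
      0 ≤ r ∧ r.toNat < (pvS1B hs raw).1.length := by
    intro r hr
    have := PySem.List.mem_pyRange_one.mp hr
    rw [j1]
    omega
  have hslot : pvSlot hs raw
      = ((pvFreeB hs raw).zip (pvLeft hs raw)).foldl
          (fun s q => PySem.List.pySetD s q.1 (some q.2)) (pvS1B hs raw).1 := by
    unfold pvSlot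
    simp only [PySem.List.len_eq]
    exact pvP2 _ _ _ hRnd hRbnd
  -- the pairs written in phase 2 are fresh on both sides
  have hfresh : ∀ q ∈ (pvFreeB hs raw).zip (pvLeft hs raw),
      PySem.List.pyGetD (pvS1B hs raw).1 q.1 none = none ∧ 0 ≤ q.1
        ∧ q.1.toNat < (pvS1B hs raw).1.length ∧ (pvS1M hs raw).1.get? q.2 = none := by
    intro q hq
    obtain ⟨hq1, hq2⟩ := List.of_mem_zip hq
    have hq1' := List.mem_filter.mp hq1
    have hbr := hRbnd q.1 hq1'.1
    have hempty : PySem.List.pyGetD (pvS1B hs raw).1 q.1 none = none := by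
      cases hg : PySem.List.pyGetD (pvS1B hs raw).1 q.1 none
      · rfl
      · rw [hg] at hq1'; simp at hq1'
    refine ⟨hempty, hbr.1, hbr.2, ?_⟩
    have hq2' := List.mem_filter.mp hq2
    have hcf : (pvS1M hs raw).1.contains q.2 = false := by
      have := hq2'.2
      rw [j3] at this
      simpa using this
    have := PySem.Dict.contains_eq_isSome_get? (pvS1M hs raw).1 q.2
    rw [hcf] at this
    cases hg : (pvS1M hs raw).1.get? q.2 with
    | none => rfl
    | some v => rw [hg] at this; simp at this
  have hnd1 : (((pvFreeB hs raw).zip (pvLeft hs raw)).map Prod.fst).Nodup :=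
    (hRnd.filter _).sublist (pvZipFstSublist _ _)
  have hnd2 : (((pvFreeB hs raw).zip (pvLeft hs raw)).map Prod.snd).Nodup :=
    (((PySem.List.nodup_dedup hs).filter _)).sublist (pvZipSndSublist _ _)
  -- final correspondence: the slot array is the inverse of pvPlaced
  have hplaced : pvPlaced hs raw
      = ((pvFreeB hs raw).zip (pvLeft hs raw)).foldl
          (fun d q => d.insert q.2 q.1) (pvS1M hs raw).1 := by
    have hL : (PySem.List.dedup hs).filter (fun h => ! (pvS1M hs raw).1.contains h)
        = pvLeft hs raw := by rw [pvLeftEq]; unfold pvU; rfl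
    have hF : pvFree hs raw = pvFreeB hs raw := (pvFreeBEq hs raw).symm
    unfold pvPlaced
    rw [hL, hF, pvZipSwap]
  have hcorr : pvCorr (pvSlot hs raw) (pvPlaced hs raw) := by
    rw [hslot, hplaced]
    exact pvP3 _ _ _ j5 hfresh hnd1 hnd2
  -- bounds on pvPlaced's values
  have hbounds : ∀ h r, (pvPlaced hs raw).get? h = some r → 1 ≤ r ∧ r ≤ (hs.length : Int) := by
    rw [hplaced]
    apply pvFoldVals _ _ _ j6
    intro q hq
    obtain ⟨hq1, -⟩ := List.of_mem_zip hq
    have := PySem.List.mem_pyRange_one.mp (List.mem_filter.mp hq1).1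
    simp only [PySem.List.len_eq] at this
    omega
  -- coverage: every horse of hs has a rank in pvPlaced
  have hlenBF : (pvLeft hs raw).length ≤ (pvFreeB hs raw).length := by
    rw [pvFreeBEq, pvLeftEq]
    exact pvLenFree hs raw
  have hcover : ∀ h ∈ hs, ∃ r, (pvPlaced hs raw).get? h = some r := by
    intro h hm
    by_cases hc : (pvS1M hs raw).1.contains h = true
    · have hsome : ((pvS1M hs raw).1.get? h).isSome := by
        rw [← PySem.Dict.contains_eq_isSome_get?]; exact hc
      obtain ⟨r0, hr0⟩ := Option.isSome_iff_exists.mp hsome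
      refine ⟨r0, ?_⟩
      rw [hplaced, pvFoldPreserve _ _ h ?_, hr0]
      intro q hq
      obtain ⟨-, hq2⟩ := List.of_mem_zip hq
      have := (List.mem_filter.mp hq2).2
      rw [j3] at this
      intro e
      subst e
      rw [hc] at this
      simp at this
    · have hml : h ∈ pvLeft hs raw := by
        unfold pvLeft
        rw [List.mem_filter]
        refine ⟨(PySem.List.mem_dedup hs h).mpr hm, ?_⟩
        rw [j3]
        simpa using hc
      obtain ⟨r, -, hr⟩ := pvZipCovers (pvLeft hs raw) (pvFreeB hs raw) (pvS1M hs raw).1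
        ((PySem.List.nodup_dedup hs).filter _) hlenBF h hml
      exact ⟨r, by rw [hplaced]; exact hr⟩
  -- rank_of agrees with pvPlaced on every horse of hs
  have hrank : ∀ h ∈ hs, (pvRank hs raw).get? h = (pvPlaced hs raw).get? h := by
    intro h hm
    obtain ⟨r, hr⟩ := hcover h hm
    obtain ⟨hb1, hb2⟩ := hbounds h r hr
    have hgs : PySem.List.pyGetD (pvSlot hs raw) r none = some h :=
      (hcorr r h (by omega)).mpr hr
    have huniq : ∀ r' ∈ PySem.List.pyRange 1 ((hs.length : Int) + 1),
        PySem.List.pyGetD (pvSlot hs raw) r' none = some h → r' = r := by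
      intro r' hrm' hg'
      have hbnd' := PySem.List.mem_pyRange_one.mp hrm'
      have := (hcorr r' h (by omega)).mp hg'
      rw [hr] at this
      simpa using this.symm
    rw [hr]
    unfold pvRank
    simp only [PySem.List.len_eq]
    exact pvRankOf (pvSlot hs raw) h r _ _ hRnd
      (PySem.List.mem_pyRange_one.mpr ⟨by omega, by omega⟩) hgs huniq
  show (hs.foldl (fun (d : PySem.Dict String Int) hid =>
      d.insert hid ((pvRank hs raw).getD hid 0)) PySem.Dict.empty).items
    = (hs.foldl (fun (d : PySem.Dict String Int) hid =>
      d.insert hid ((pvPlaced hs raw).getD hid 0)) PySem.Dict.empty).items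
  congr 1
  apply PySem.List.foldl_congr_mem
  intro acc hid hm
  congr 1
  rw [PySem.Dict.getD_eq_get?_getD, PySem.Dict.getD_eq_get?_getD, hrank hid hm]

-- ===== VERDICT (by name: the statement is the Claim_ definition above) =====
theorem ensure_permutation_ranks_spec : Claim_equal_ensure_permutation_ranks := by
  intro hs raw _
  show _ = _
  rw [pvAeq, pvBeq]
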